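-- pv_equiv track=rewrite | github.com/Ananta-dot/PB_POC | motifs.py | motif_interleave
-- ===== SOURCE A (Python) =====
-- from typing import List, Tuple
--
-- Seq  = List[int]
--
-- def motif_interleave(n: int) -> Seq:
--     # [1,2,1,2, 3,4,3,4, ...] then trimmed to two of each label
--     out=[]
--     for i in range(1, n+1, 2):
--         j = i+1 if i+1<=n else i
--         out += [i, j, i, j]
--     # ensure exactly two per label
--     cnt = {i:0 for i in range(1,n+1)}
--     fixed=[]
--     for x in out:
--         if cnt[x] < 2:
--             fixed.append(x); cnt[x]+=1
--     for i in range(1,n+1):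
--         while cnt[i] < 2:
--             fixed.append(i); cnt[i]+=1
--     return fixed[:2*n]
-- ===== SOURCE B (Python) =====
-- from typing import List
--
-- Seq = List[int]
--
-- def motif_interleave(n: int) -> Seq:
--     # Build the final sequence directly: each odd i contributes [i, i+1, i, i+1],
--     # or [i, i] when i is the odd tail; no counter dict, no trim/fill passes.
--     out = []
--     for i in range(1, n + 1, 2):
--         if i + 1 <= n:
--             out += [i, i + 1, i, i + 1]
--         else:
--             out += [i, i]
--     return out
-- ===== Notes on version B (the rewrite author's own statement) =====
-- stated objective: simpler
-- what changed: B emits the final interleaved sequence directly in one pass over the odd starts (a 4-element block per full pair, a 2-element tail block for odd n), eliminating A's overshoot build, its count dict, the trim pass, the fill pass and the final slice.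
import Mathlib
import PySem

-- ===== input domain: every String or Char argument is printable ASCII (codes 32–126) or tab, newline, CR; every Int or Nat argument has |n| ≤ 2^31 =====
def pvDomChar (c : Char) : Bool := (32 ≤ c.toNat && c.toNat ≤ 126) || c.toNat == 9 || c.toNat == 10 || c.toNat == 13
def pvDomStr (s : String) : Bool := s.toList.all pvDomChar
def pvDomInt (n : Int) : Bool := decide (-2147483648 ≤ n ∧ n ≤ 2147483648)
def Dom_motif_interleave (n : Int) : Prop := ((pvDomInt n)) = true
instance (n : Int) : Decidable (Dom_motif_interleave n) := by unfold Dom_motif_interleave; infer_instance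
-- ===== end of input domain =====

-- B builds the final sequence directly in one pass (each pair-block already has two of each
-- label), dropping A's counter dict, trim pass, fill pass and final slice; objective: simpler.

-- ===== PORT A =====
-- loop body of A's first loop: out += [i, j, i, j] with j = i+1 if i+1<=n else i
def pvBuildStep (n : Int) (out : List Int) (i : Int) : List Int :=
  let j := if i + 1 ≤ n then i + 1 else i
  out ++ [i, j, i, j]

-- loop body of A's trim loop; Python's cnt[x] / cnt[x] += 1 act on keys that are always
-- present (every x lies in 1..n), so Dict.getD / Dict.insert are exact here
def pvTrimStep (st : List Int × PySem.Dict Int Int) (x : Int) : List Int × PySem.Dict Int Int :=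
  if st.2.getD x 0 < 2 then (st.1 ++ [x], st.2.insert x (st.2.getD x 0 + 1)) else st

-- A's inner 'while cnt[i] < 2' loop, with fuel = the exact number of iterations it performs
-- (each pass increments cnt[i] by exactly 1, so it runs (2 - cnt[i]) times)
def pvFillGo (i : Int) : Nat → List Int × PySem.Dict Int Int → List Int × PySem.Dict Int Int
  | 0, st => st
  | f + 1, st =>
      if st.2.getD i 0 < 2 then pvFillGo i f (st.1 ++ [i], st.2.insert i (st.2.getD i 0 + 1))
      else st

def pvFill (i : Int) (st : List Int × PySem.Dict Int Int) : List Int × PySem.Dict Int Int :=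
  pvFillGo i (2 - st.2.getD i 0).toNat st

def motif_interleave (n : Int) : List Int :=
  let out := (PySem.List.pyRange 1 (n + 1) 2).foldl (pvBuildStep n) []
  let cnt := (PySem.List.pyRange 1 (n + 1) 1).foldl
      (fun d i => d.insert i 0) (PySem.Dict.empty : PySem.Dict Int Int)
  let st := out.foldl pvTrimStep ([], cnt)
  let st2 := (PySem.List.pyRange 1 (n + 1) 1).foldl (fun st i => pvFill i st) st
  PySem.List.slice st2.1 none (some (2 * n))

-- ===== PORT B =====
def motif_interleave_alt (n : Int) : List Int :=
  (PySem.List.pyRange 1 (n + 1) 2).foldl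
    (fun out i => if i + 1 ≤ n then out ++ [i, i + 1, i, i + 1] else out ++ [i, i]) []

-- ===== PRECONDITION & SPEC =====
def Spec_motif_interleave (n : Int) (out : List Int) : Prop := out = motif_interleave_alt n
instance (n : Int) (out : List Int) : Decidable (Spec_motif_interleave n out) := by unfold Spec_motif_interleave; infer_instance

-- ===== CLAIM (what is proved, stated in full; the proofs are below) =====
def Claim_equal_motif_interleave : Prop := ∀ (n : Int), Dom_motif_interleave n → Spec_motif_interleave n (motif_interleave n)

-- ===== LEMMAS AND PROOFS =====

-- the blocks A's build loop appends, and the blocks B appends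
def pvBlockA (n i : Int) : List Int :=
  let j := if i + 1 ≤ n then i + 1 else i
  [i, j, i, j]

def pvBlockB (n i : Int) : List Int :=
  if i + 1 ≤ n then [i, i + 1, i, i + 1] else [i, i]

lemma pyRange_two_nil (a b : Int) (h : b ≤ a) : PySem.List.pyRange a b 2 = [] := by
  rw [PySem.List.pyRange_of_pos a b (by norm_num)]
  simp [if_neg (not_lt.mpr h)]

lemma pyRange_two_cons (a b : Int) (h : a < b) :
    PySem.List.pyRange a b 2 = a :: PySem.List.pyRange (a + 2) b 2 := by
  rw [PySem.List.pyRange_of_pos a b (by norm_num),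
      PySem.List.pyRange_of_pos (a + 2) b (by norm_num)]
  have hc : (if a < b then ((b - a + 2 - 1) / 2).toNat else 0)
      = (if a + 2 < b then ((b - (a + 2) + 2 - 1) / 2).toNat else 0) + 1 := by
    by_cases h2 : a + 2 < b <;> simp [h, h2] <;> omega
  rw [hc, List.range_succ_eq_map]
  simp only [List.map_cons, List.map_map]
  congr 1
  · norm_num
  · apply List.map_congr_left
    intro k _
    simp only [Function.comp]
    push_cast
    ring

lemma pvB_eq_flatMap (n : Int) :
    motif_interleave_alt n = (PySem.List.pyRange 1 (n + 1) 2).flatMap (pvBlockB n) := by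
  unfold motif_interleave_alt
  have : (fun (out : List Int) (i : Int) =>
      if i + 1 ≤ n then out ++ [i, i + 1, i, i + 1] else out ++ [i, i])
      = fun out i => out ++ pvBlockB n i := by
    funext out i
    by_cases h : i + 1 ≤ n <;> simp [pvBlockB, h]
  rw [this, PySem.List.foldl_append_eq_flatMap]
  simp

lemma pvA_out_eq_flatMap (n : Int) (acc : List Int) :
    (PySem.List.pyRange 1 (n + 1) 2).foldl (pvBuildStep n) acc
      = acc ++ (PySem.List.pyRange 1 (n + 1) 2).flatMap (pvBlockA n) := by
  have : pvBuildStep n = fun out i => out ++ pvBlockA n i := by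
    funext out i; simp [pvBuildStep, pvBlockA]
  rw [this, PySem.List.foldl_append_eq_flatMap]

lemma getD_init_zero (L : List Int) (d : PySem.Dict Int Int)
    (hd : ∀ k, d.getD k 0 = 0) :
    ∀ k, (L.foldl (fun d i => d.insert i 0) d).getD k 0 = 0 := by
  induction L generalizing d with
  | nil => exact hd
  | cons x t ih =>
      intro k
      simp only [List.foldl_cons]
      refine ih _ (fun k => ?_) k
      rw [PySem.Dict.getD_insert]
      split <;> simp [hd]

lemma trimStep_lt (st : List Int × PySem.Dict Int Int) (x : Int)
    (h : st.2.getD x 0 < 2) :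
    pvTrimStep st x = (st.1 ++ [x], st.2.insert x (st.2.getD x 0 + 1)) := by
  simp [pvTrimStep, h]

lemma trimStep_ge (st : List Int × PySem.Dict Int Int) (x : Int)
    (h : ¬ st.2.getD x 0 < 2) : pvTrimStep st x = st := by
  simp [pvTrimStep, h]

-- the trim pass over A's blocks from any suffix start 'a' of the odd range: it emits exactly
-- B's blocks and leaves every label in [a, n] with count 2
lemma trim_main (n : Int) :
    ∀ (a : Int) (fixed : List Int) (cnt : PySem.Dict Int Int),
    (∀ k, a ≤ k → cnt.getD k 0 = 0) →
    ∃ cnt', ((PySem.List.pyRange a (n + 1) 2).flatMap (pvBlockA n)).foldl pvTrimStep (fixed, cnt)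
        = (fixed ++ (PySem.List.pyRange a (n + 1) 2).flatMap (pvBlockB n), cnt')
      ∧ ∀ k, cnt'.getD k 0 = if a ≤ k ∧ k ≤ n then 2 else cnt.getD k 0 := by
  intro a
  induction hm : (n + 1 - a).toNat using Nat.strong_induction_on generalizing a with
  | _ m ih =>
    intro fixed cnt hcnt
    by_cases hle : n < a
    · refine ⟨cnt, ?_, ?_⟩
      · rw [pyRange_two_nil a (n + 1) (by omega)]; simp
      · intro k; rw [if_neg (by omega)]
    · rw [not_lt] at hle
      rw [pyRange_two_cons a (n + 1) (by omega)]
      simp only [List.flatMap_cons, List.foldl_append]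
      have ha0 : cnt.getD a 0 = 0 := hcnt a le_rfl
      by_cases hcase : a + 1 ≤ n
      · -- full block [a, a+1, a, a+1]
        have hblockA : pvBlockA n a = [a, a + 1, a, a + 1] := by
          unfold pvBlockA; rw [if_pos hcase]
        have hblockB : pvBlockB n a = [a, a + 1, a, a + 1] := by
          unfold pvBlockB; rw [if_pos hcase]
        have ha1 : cnt.getD (a + 1) 0 = 0 := hcnt (a + 1) (by omega)
        have e1 : pvTrimStep (fixed, cnt) a = (fixed ++ [a], cnt.insert a 1) := by
          rw [trimStep_lt _ _ (by rw [ha0]; norm_num)]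
          rw [ha0]
          simp
        have g1 : (cnt.insert a 1).getD (a + 1) 0 = 0 := by
          rw [PySem.Dict.getD_insert, if_neg (by omega), ha1]
        have e2 : pvTrimStep (fixed ++ [a], cnt.insert a 1) (a + 1)
            = (fixed ++ [a, a + 1], (cnt.insert a 1).insert (a + 1) 1) := by
          rw [trimStep_lt _ _ (by rw [g1]; norm_num)]
          rw [g1]
          simp
        have g2 : ((cnt.insert a 1).insert (a + 1) 1).getD a 0 = 1 := by
          rw [PySem.Dict.getD_insert, if_neg (by omega), PySem.Dict.getD_insert, if_pos rfl]
        have e3 : pvTrimStep (fixed ++ [a, a + 1], (cnt.insert a 1).insert (a + 1) 1) a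
            = (fixed ++ [a, a + 1, a], ((cnt.insert a 1).insert (a + 1) 1).insert a 2) := by
          rw [trimStep_lt _ _ (by rw [g2]; norm_num)]
          rw [g2]
          simp
        have g3 : (((cnt.insert a 1).insert (a + 1) 1).insert a 2).getD (a + 1) 0 = 1 := by
          rw [PySem.Dict.getD_insert, if_neg (by omega), PySem.Dict.getD_insert, if_pos rfl]
        have e4 : pvTrimStep (fixed ++ [a, a + 1, a],
              ((cnt.insert a 1).insert (a + 1) 1).insert a 2) (a + 1)
            = (fixed ++ [a, a + 1, a, a + 1],
               (((cnt.insert a 1).insert (a + 1) 1).insert a 2).insert (a + 1) 2) := by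
          rw [trimStep_lt _ _ (by rw [g3]; norm_num)]
          rw [g3]
          simp
        have hfold : (pvBlockA n a).foldl pvTrimStep (fixed, cnt)
            = (fixed ++ [a, a + 1, a, a + 1],
               (((cnt.insert a 1).insert (a + 1) 1).insert a 2).insert (a + 1) 2) := by
          rw [hblockA]
          simp only [List.foldl_cons, List.foldl_nil]
          rw [e1, e2, e3, e4]
        set cnt2 := (((cnt.insert a 1).insert (a + 1) 1).insert a 2).insert (a + 1) 2 with hcnt2
        have hcnt2D : ∀ k, cnt2.getD k 0 = if k = a ∨ k = a + 1 then 2 else cnt.getD k 0 := by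
          intro k
          rw [hcnt2]
          rw [PySem.Dict.getD_insert, PySem.Dict.getD_insert, PySem.Dict.getD_insert,
            PySem.Dict.getD_insert]
          by_cases h1 : k = a + 1
          · simp [h1]
          · by_cases h2 : k = a <;> simp [h1, h2]
        obtain ⟨cnt', hfold', hD⟩ := ih (n + 1 - (a + 2)).toNat (by omega) (a + 2) (by omega)
          (fixed ++ [a, a + 1, a, a + 1]) cnt2
          (fun k hk => by rw [hcnt2D, if_neg (by omega)]; exact hcnt k (by omega))
        refine ⟨cnt', ?_, ?_⟩
        · rw [hfold, hfold', hblockB]; simp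
        · intro k
          rw [hD, hcnt2D]
          by_cases h1 : a + 2 ≤ k ∧ k ≤ n
          · rw [if_pos h1, if_pos (by omega)]
          · rw [if_neg h1]
            by_cases h2 : k = a ∨ k = a + 1
            · rw [if_pos h2, if_pos (by omega)]
            · rw [if_neg h2, if_neg (by omega)]
      · -- tail block: a = n, pvBlockA = [n, n, n, n], trim keeps two of the label
        have hblockA : pvBlockA n a = [a, a, a, a] := by
          unfold pvBlockA; rw [if_neg hcase]
        have hblockB : pvBlockB n a = [a, a] := by
          unfold pvBlockB; rw [if_neg hcase]
        have e1 : pvTrimStep (fixed, cnt) a = (fixed ++ [a], cnt.insert a 1) := by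
          rw [trimStep_lt _ _ (by rw [ha0]; norm_num)]
          rw [ha0]
          simp
        have g1 : (cnt.insert a 1).getD a 0 = 1 := by
          rw [PySem.Dict.getD_insert, if_pos rfl]
        have e2 : pvTrimStep (fixed ++ [a], cnt.insert a 1) a
            = (fixed ++ [a, a], (cnt.insert a 1).insert a 2) := by
          rw [trimStep_lt _ _ (by rw [g1]; norm_num)]
          rw [g1]
          simp
        have g2 : ((cnt.insert a 1).insert a 2).getD a 0 = 2 := by
          rw [PySem.Dict.getD_insert, if_pos rfl]
        have e3 : pvTrimStep (fixed ++ [a, a], (cnt.insert a 1).insert a 2) a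
            = (fixed ++ [a, a], (cnt.insert a 1).insert a 2) := by
          rw [trimStep_ge _ _ (by rw [g2]; norm_num)]
        have hfold : (pvBlockA n a).foldl pvTrimStep (fixed, cnt)
            = (fixed ++ [a, a], (cnt.insert a 1).insert a 2) := by
          rw [hblockA]
          simp only [List.foldl_cons, List.foldl_nil]
          rw [e1, e2, e3, e3]
        have hnil : PySem.List.pyRange (a + 2) (n + 1) 2 = [] :=
          pyRange_two_nil _ _ (by omega)
        refine ⟨(cnt.insert a 1).insert a 2, ?_, ?_⟩
        · rw [hfold, hnil, hblockB]; simp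
        · intro k
          rw [PySem.Dict.getD_insert, PySem.Dict.getD_insert]
          by_cases h1 : k = a
          · rw [if_pos h1, if_pos (by omega)]
          · rw [if_neg h1, if_neg h1, if_neg (by omega)]

lemma fill_noop (L : List Int) (st : List Int × PySem.Dict Int Int)
    (h : ∀ i ∈ L, (2 - st.2.getD i 0).toNat = 0) :
    L.foldl (fun st i => pvFill i st) st = st := by
  induction L with
  | nil => rfl
  | cons x t ih =>
      simp only [List.foldl_cons]
      have hx : pvFill x st = st := by
        unfold pvFill
        rw [h x (List.mem_cons_self)]
        rfl
      rw [hx]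
      exact ih (fun i hi => h i (List.mem_cons_of_mem _ hi))

lemma lenB (n : Int) : ∀ (a : Int),
    ((PySem.List.pyRange a (n + 1) 2).flatMap (pvBlockB n)).length = 2 * (n + 1 - a).toNat / 2 * 2 := by
  intro a
  induction hm : (n + 1 - a).toNat using Nat.strong_induction_on generalizing a with
  | _ m ih =>
    by_cases hle : n < a
    · rw [pyRange_two_nil a (n + 1) (by omega)]
      simp
      omega
    · rw [pyRange_two_cons a (n + 1) (by omega)]
      simp only [List.flatMap_cons, List.length_append]
      rw [ih (n + 1 - (a + 2)).toNat (by omega) (a + 2) rfl]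
      by_cases hcase : a + 1 ≤ n
      · have : pvBlockB n a = [a, a + 1, a, a + 1] := by unfold pvBlockB; rw [if_pos hcase]
        rw [this]
        simp
        omega
      · have : pvBlockB n a = [a, a] := by unfold pvBlockB; rw [if_neg hcase]
        rw [this]
        simp
        omega

-- ===== VERDICT (by name: the statement is the Claim_ definition above) =====
theorem motif_interleave_spec : Claim_equal_motif_interleave := by
  intro n _
  unfold Spec_motif_interleave motif_interleave
  simp only []
  rw [pvA_out_eq_flatMap n []]
  simp only [List.nil_append]
  have hcnt0 := getD_init_zero (PySem.List.pyRange 1 (n + 1) 1)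
    (PySem.Dict.empty : PySem.Dict Int Int) (by intro k; simp [pysem])
  obtain ⟨cnt', hfold, hD⟩ := trim_main n 1 [] _ (fun k _ => hcnt0 k)
  rw [hfold]
  rw [fill_noop _ _ (by
    intro i hi
    have := (PySem.List.mem_pyRange_one).1 hi
    simp only [hD]
    rw [if_pos (by omega)]
    rfl)]
  simp only [List.nil_append]
  rw [← pvB_eq_flatMap n]
  by_cases hn : 1 ≤ n
  · rw [PySem.List.slice_to _ (by omega : (0:Int) ≤ 2 * n)]
    apply List.take_of_length_le
    rw [pvB_eq_flatMap n, lenB n 1]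
    omega
  · have : motif_interleave_alt n = [] := by
      unfold motif_interleave_alt
      rw [pyRange_two_nil 1 (n + 1) (by omega)]
      rfl
    rw [this]
    simp [PySem.List.slice]
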